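-- pv_equiv track=rewrite | github.com/mandeep-75/Youtube_Automation | src/steps/step5_tts.py | _auto_format_lyrics
-- ===== SOURCE A (Python) =====
-- def _auto_format_lyrics(script: str) -> str:
--     """Auto-format plain text script into lyrics with markers."""
--     words = script.split()
--     lines: list[str] = []
--     current_line: list[str] = []
--     words_per_line = 10
--
--     for word in words:
--         current_line.append(word)
--         if len(current_line) >= words_per_line:
--             lines.append(" ".join(current_line))
--             current_line = []
--
--     if current_line:
--         lines.append(" ".join(current_line))
--
--     verses: list[str] = []
--     verse_size = 4
--     for i in range(0, len(lines), verse_size):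
--         verse_chunk: list[str] = lines[i : i + verse_size]
--         if verse_chunk:
--             verses.append("\n".join(verse_chunk))
--
--     lyrics_parts: list[str] = []
--     verse_markers: list[str] = ["[Verse]", "[Pre-Chorus]", "[Chorus]", "[Bridge]"]
--
--     for i, verse in enumerate(verses):
--         marker_idx = min(i, len(verse_markers) - 1)
--         marker: str = verse_markers[marker_idx]
--         lyrics_parts.append(f"{marker}\n{verse}")
--
--     return "\n\n".join(lyrics_parts)
-- ===== SOURCE B (Python) =====
-- def _auto_format_lyrics(script: str) -> str:
--     """Auto-format plain text script into lyrics with markers."""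
--     words = script.split()
--     markers = ["[Verse]", "[Pre-Chorus]", "[Chorus]", "[Bridge]"]
--     parts: list[str] = []
--     idx = 0
--     while words:
--         block, words = words[:40], words[40:]
--         lines: list[str] = []
--         while block:
--             lines.append(" ".join(block[:10]))
--             block = block[10:]
--         parts.append(markers[min(idx, len(markers) - 1)] + "\n" + "\n".join(lines))
--         idx += 1
--     return "\n\n".join(parts)
-- ===== Notes on version B (the rewrite author's own statement) =====
-- stated objective: alternative
-- what changed: Replaces A's three sequential flat passes (word-fold into 10-word lines, range/slice grouping of lines into 4-line verses, enumerate loop attaching markers) with a single outer loop that carves the word list directly into 40-word blocks, splitting each block into lines and attaching its marker on the spot.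
import Mathlib
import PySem

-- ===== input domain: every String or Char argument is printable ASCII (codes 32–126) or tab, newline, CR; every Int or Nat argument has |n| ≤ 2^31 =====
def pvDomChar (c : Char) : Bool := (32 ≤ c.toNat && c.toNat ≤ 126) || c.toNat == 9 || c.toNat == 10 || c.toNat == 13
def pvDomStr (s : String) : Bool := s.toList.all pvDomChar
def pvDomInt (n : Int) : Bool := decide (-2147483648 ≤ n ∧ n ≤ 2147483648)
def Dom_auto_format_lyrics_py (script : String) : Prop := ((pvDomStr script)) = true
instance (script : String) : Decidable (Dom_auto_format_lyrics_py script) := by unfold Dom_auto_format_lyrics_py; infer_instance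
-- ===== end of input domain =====

-- B carves the word list directly into 40-word blocks (lines and marker attached per block)
-- instead of A's three sequential flat passes; alternative decomposition, same cost.


-- ===== PORT A =====
-- body of `for word in words:` (state = (lines, current_line); words_per_line = 10)
def aLineStep (st : List String × List String) (w : String) : List String × List String :=
  let cur := st.2 ++ [w]
  if cur.length ≥ 10 then (st.1 ++ [PySem.Str.join " " cur], ([] : List String))
  else (st.1, cur)

-- `if current_line: lines.append(" ".join(current_line))`
def aFlush (st : List String × List String) : List String :=
  if st.2 = [] then st.1 else st.1 ++ [PySem.Str.join " " st.2]

-- body of `for i in range(0, len(lines), 4):` (verse_size = 4)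
def aVerseStep (lines : List String) (acc : List String) (i : Int) : List String :=
  let chunk := PySem.List.slice lines (some i) (some (i + 4))
  if chunk = [] then acc else acc ++ [PySem.Str.join "\n" chunk]

def aMarkers : List String := ["[Verse]", "[Pre-Chorus]", "[Chorus]", "[Bridge]"]

-- body of `for i, verse in enumerate(verses):`
def aMarkStep (acc : List String) (p : Int × String) : List String :=
  let marker := PySem.List.pyGetD aMarkers (min p.1 ((aMarkers.length : Int) - 1)) ""
  acc ++ [marker ++ "\n" ++ p.2]

def auto_format_lyrics_py (script : String) : String :=
  let words := PySem.Str.split₀ script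
  let lines := aFlush (words.foldl aLineStep ([], []))
  let verses := (PySem.List.pyRange 0 (lines.length : Int) 4).foldl (aVerseStep lines) []
  let parts := (PySem.List.enumerate verses).foldl aMarkStep []
  PySem.Str.join "\n\n" parts

-- ===== PORT B =====
-- inner `while block:` loop of B: peel 10 words at a time into a joined line
def bLines : List String → List String
  | [] => []
  | b :: bs =>
      PySem.Str.join " " ((b :: bs).take 10) :: bLines ((b :: bs).drop 10)
termination_by block => block.length
decreasing_by simp

def bMarkers : List String := ["[Verse]", "[Pre-Chorus]", "[Chorus]", "[Bridge]"]

-- outer `while words:` loop of B: peel a 40-word block, format it with its marker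
def bBuild : List String → Nat → List String
  | [], _ => []
  | w :: ws, idx =>
      (bMarkers.getD (min idx (bMarkers.length - 1)) "" ++ "\n"
        ++ PySem.Str.join "\n" (bLines ((w :: ws).take 40)))
      :: bBuild ((w :: ws).drop 40) (idx + 1)
termination_by ws _ => ws.length
decreasing_by simp

def auto_format_lyrics_py_alt (script : String) : String :=
  PySem.Str.join "\n\n" (bBuild (PySem.Str.split₀ script) 0)

-- ===== PRECONDITION & SPEC =====
def Spec_auto_format_lyrics_py (script : String) (out : String) : Prop := out = auto_format_lyrics_py_alt script
instance (script : String) (out : String) : Decidable (Spec_auto_format_lyrics_py script out) := by unfold Spec_auto_format_lyrics_py; infer_instance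

-- ===== CLAIM (what is proved, stated in full; the proofs are below) =====
def Claim_equal_auto_format_lyrics_py : Prop := ∀ (script : String), Dom_auto_format_lyrics_py script → Spec_auto_format_lyrics_py script (auto_format_lyrics_py script)

-- ===== LEMMAS AND PROOFS =====

-- A's verse grouping, as a recursion on the line list
def vchunks : List String → List String
  | [] => []
  | l :: ls => PySem.Str.join "\n" ((l :: ls).take 4) :: vchunks ((l :: ls).drop 4)
termination_by ls => ls.length
decreasing_by simp

-- A's marker attachment, as a recursion on the verse list
def markMap (idx : Nat) : List String → List String
  | [] => []
  | v :: vs => (aMarkers.getD (min idx (aMarkers.length - 1)) "" ++ "\n" ++ v) :: markMap (idx + 1) vs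

theorem lines_loop (ws : List String) : ∀ (lines cur : List String), cur.length < 10 →
    aFlush (ws.foldl aLineStep (lines, cur)) = lines ++ bLines (cur ++ ws) := by
  induction ws with
  | nil =>
      intro lines cur h
      cases cur with
      | nil => simp [aFlush, bLines]
      | cons c cs =>
          simp only [List.foldl_nil, List.append_nil, aFlush]
          rw [if_neg (by simp)]
          rw [bLines]
          simp at h
          rw [List.take_of_length_le (by simp; omega), List.drop_of_length_le (by simp; omega)]
          simp [bLines]
  | cons w ws ih =>
      intro lines cur h
      rw [List.foldl_cons]
      by_cases h10 : (cur ++ [w]).length ≥ 10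
      · have hlen : (cur ++ [w]).length = 10 := by simp at h10 ⊢; omega
        have hstep : aLineStep (lines, cur) w
            = (lines ++ [PySem.Str.join " " (cur ++ [w])], ([] : List String)) := by
          simp only [aLineStep]
          rw [if_pos h10]
        rw [hstep, ih _ [] (by simp)]
        have hsplit : cur ++ w :: ws = (cur ++ [w]) ++ ws := by simp
        rw [hsplit]
        obtain ⟨x, xs, hcw⟩ : ∃ x xs, cur ++ [w] = x :: xs := by
          cases cur with
          | nil => exact ⟨w, [], rfl⟩
          | cons c cs => exact ⟨c, cs ++ [w], by simp⟩
        rw [hcw, List.cons_append, bLines, ← List.cons_append, ← hcw]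
        rw [show (10 : Nat) = (cur ++ [w]).length from hlen.symm, List.take_left, List.drop_left]
        simp
      · have hstep : aLineStep (lines, cur) w = (lines, cur ++ [w]) := by
          simp only [aLineStep]
          rw [if_neg h10]
        rw [hstep, ih lines (cur ++ [w]) (by simp at h10 ⊢; omega)]
        simp

theorem pyRange4_nil (a b : Int) (h : b ≤ a) : PySem.List.pyRange a b 4 = [] := by
  rw [PySem.List.pyRange_of_pos a b (by norm_num)]
  rw [if_neg (by omega)]
  simp

theorem pyRange4_cons (a b : Int) (h : a < b) :
    PySem.List.pyRange a b 4 = a :: PySem.List.pyRange (a + 4) b 4 := by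
  rw [PySem.List.pyRange_of_pos a b (by norm_num), PySem.List.pyRange_of_pos (a+4) b (by norm_num)]
  have hcnt : (if a < b then ((b - a + 4 - 1) / 4).toNat else 0)
      = (if a + 4 < b then ((b - (a + 4) + 4 - 1) / 4).toNat else 0) + 1 := by
    rw [if_pos h]
    by_cases h4 : a + 4 < b
    · rw [if_pos h4]; omega
    · rw [if_neg h4]; omega
  rw [hcnt, List.range_succ_eq_map]
  simp only [List.map_cons, List.map_map]
  congr 1
  · simp
  · refine List.map_congr_left (fun k _ => ?_)
    simp only [Function.comp_apply]
    push_cast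
    ring

theorem bLines_take (k : Nat) : ∀ (ws : List String),
    bLines (ws.take (10 * k)) = (bLines ws).take k := by
  induction k with
  | zero => intro ws; simp [bLines]
  | succ k ih =>
      intro ws
      cases ws with
      | nil => simp [bLines]
      | cons w ws =>
          have h1 : (w :: ws).take (10 * (k + 1)) = w :: ws.take (10 * k + 9) := by
            rw [show 10 * (k + 1) = (10 * k + 9) + 1 from by omega, List.take_succ_cons]
          rw [h1, bLines, bLines]
          rw [List.take_succ_cons, List.drop_succ_cons, List.take_succ_cons, List.drop_succ_cons]
          rw [List.take_take, List.drop_take]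
          have h2 : min 9 (10 * k + 9) = 9 := by omega
          have h3 : 10 * k + 9 - 9 = 10 * k := by omega
          rw [h2, h3, List.take_succ_cons]
          rw [ih (ws.drop 9)]

theorem bLines_drop (k : Nat) : ∀ (ws : List String),
    bLines (ws.drop (10 * k)) = (bLines ws).drop k := by
  induction k with
  | zero => intro ws; simp
  | succ k ih =>
      intro ws
      cases ws with
      | nil => simp [bLines]
      | cons w ws =>
          rw [bLines, List.drop_succ_cons]
          rw [show 10 * (k + 1) = 10 + 10 * k from by omega, ← List.drop_drop]
          rw [List.drop_succ_cons]
          exact ih ((w :: ws).drop 10)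

theorem verse_loop (L : List String) : ∀ (m j : Nat) (acc : List String),
    L.length ≤ 4 * j + m →
    (PySem.List.pyRange ((4 * j : Nat) : Int) (L.length : Int) 4).foldl (aVerseStep L) acc
    = acc ++ vchunks (L.drop (4 * j)) := by
  intro m
  induction m with
  | zero =>
      intro j acc h
      rw [pyRange4_nil _ _ (by exact_mod_cast by omega)]
      rw [List.drop_eq_nil_of_le (by omega)]
      simp [vchunks]
  | succ m ih =>
      intro j acc h
      by_cases hj : L.length ≤ 4 * j
      · rw [pyRange4_nil _ _ (by exact_mod_cast hj)]
        rw [List.drop_eq_nil_of_le hj]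
        simp [vchunks]
      · rw [Nat.not_le] at hj
        rw [pyRange4_cons _ _ (by exact_mod_cast hj), List.foldl_cons]
        have hchunk : PySem.List.slice L (some ((4 * j : Nat) : Int)) (some (((4 * j : Nat) : Int) + 4))
            = (L.drop (4 * j)).take 4 := by
          rw [show (((4 * j : Nat) : Int) + 4) = ((4 * j : Nat) : Int) + ((4 : Nat) : Int) from by push_cast; ring]
          exact PySem.List.slice_natCast_add L (4 * j) 4
        obtain ⟨l, ls, hls⟩ : ∃ l ls, L.drop (4 * j) = l :: ls := by
          cases hd : L.drop (4 * j) with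
          | nil => exfalso; have := congrArg List.length hd; simp at this; omega
          | cons l ls => exact ⟨l, ls, rfl⟩
        have hstep : aVerseStep L acc ((4 * j : Nat) : Int)
            = acc ++ [PySem.Str.join "\n" ((L.drop (4 * j)).take 4)] := by
          simp only [aVerseStep, hchunk, hls]
          rw [if_neg (by simp)]
        rw [hstep]
        have hcast : (((4 * j : Nat) : Int) + 4) = ((4 * (j + 1) : Nat) : Int) := by push_cast; ring
        rw [hcast, ih (j + 1) _ (by omega)]
        rw [hls, vchunks, ← hls]
        rw [show (L.drop (4 * j)).drop 4 = L.drop (4 * (j + 1)) from by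
          rw [List.drop_drop]; congr 1]
        simp

theorem mark_loop : ∀ (verses : List String) (s : Nat) (acc : List String),
    (PySem.List.enumerate verses ((s : Nat) : Int)).foldl aMarkStep acc
    = acc ++ markMap s verses := by
  intro verses
  induction verses with
  | nil => intro s acc; simp [PySem.List.enumerate_nil, markMap]
  | cons v vs ih =>
      intro s acc
      rw [PySem.List.enumerate_cons, List.foldl_cons]
      have hmin : min ((s : Nat) : Int) ((aMarkers.length : Int) - 1) = ((min s (aMarkers.length - 1) : Nat) : Int) := by
        rw [show aMarkers.length = 4 from rfl]
        push_cast
        omega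
      have hstep : aMarkStep acc (((s : Nat) : Int), v)
          = acc ++ [aMarkers.getD (min s (aMarkers.length - 1)) "" ++ "\n" ++ v] := by
        simp only [aMarkStep, hmin, PySem.List.pyGetD_natCast]
      rw [hstep, show (((s : Nat) : Int) + 1) = (((s + 1 : Nat)) : Int) from by push_cast; ring]
      rw [ih (s + 1)]
      rw [markMap]
      simp

theorem build_eq : ∀ (m : Nat) (ws : List String) (idx : Nat), ws.length ≤ m →
    bBuild ws idx = markMap idx (vchunks (bLines ws)) := by
  intro m
  induction m with
  | zero =>
      intro ws idx h
      have : ws = [] := by cases ws <;> simp_all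
      subst this
      simp [bBuild, bLines, vchunks, markMap]
  | succ m ih =>
      intro ws idx h
      cases ws with
      | nil => simp [bBuild, bLines, vchunks, markMap]
      | cons w ws =>
          rw [bBuild]
          obtain ⟨l, ls, hls⟩ : ∃ l ls, bLines (w :: ws) = l :: ls := ⟨_, _, by rw [bLines]⟩
          rw [hls, vchunks, ← hls, markMap]
          rw [show (bLines (w :: ws)).take 4 = bLines ((w :: ws).take 40) from by
            rw [show (40 : Nat) = 10 * 4 from rfl]; exact (bLines_take 4 (w :: ws)).symm]
          rw [show (bLines (w :: ws)).drop 4 = bLines ((w :: ws).drop 40) from by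
            rw [show (40 : Nat) = 10 * 4 from rfl]; exact (bLines_drop 4 (w :: ws)).symm]
          rw [ih ((w :: ws).drop 40) (idx + 1) (by simp at h ⊢; omega)]
          rw [show bMarkers = aMarkers from rfl]

-- ===== VERDICT (by name: the statement is the Claim_ definition above) =====
theorem auto_format_lyrics_py_spec : Claim_equal_auto_format_lyrics_py := by
  intro script _
  unfold Spec_auto_format_lyrics_py
  simp only [auto_format_lyrics_py, auto_format_lyrics_py_alt]
  rw [lines_loop _ [] [] (by simp)]
  simp only [List.nil_append]
  have hv := verse_loop (bLines (PySem.Str.split₀ script))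
    (bLines (PySem.Str.split₀ script)).length 0 [] (by omega)
  norm_num at hv
  rw [hv]
  have hm := mark_loop (vchunks (bLines (PySem.Str.split₀ script))) 0 []
  norm_num at hm
  rw [hm]
  rw [build_eq (PySem.Str.split₀ script).length _ 0 (by omega)]
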